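-- pv_equiv track=rewrite | github.com/wyk18703232953/myResearch | codeComplex/data copy/filteredData/python/linear/python_linear_0457.py | solve
-- ===== SOURCE A (Python) =====
-- def lts(l):
--     return ''.join(map(str, l))
--
-- def solve(n, k, s):
--     ans = []
--     lb = k // 2
--     rb = k // 2
--     for c in s:
--         if lb > 0:
--             if c == "(":
--                 lb -= 1
--
--             else:
--                 rb -= 1
--             ans.append(c)
--         elif rb > 0:
--             if c == ")":
--                 ans.append(c)
--                 rb -= 1
--         elif lb == 0 and rb == 0:
--             break
--     return lts(ans)
-- ===== SOURCE B (Python) =====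
-- def solve(n, k, s):
--     m = k // 2
--     if m <= 0:
--         return ""
--     # cut = index just past the m-th '(' (len(s) if fewer than m exist)
--     cnt = 0
--     cut = len(s)
--     for i, c in enumerate(s):
--         if c == "(":
--             cnt += 1
--             if cnt == m:
--                 cut = i + 1
--                 break
--     prefix = s[:cut]
--     need = m - (len(prefix) - prefix.count("("))
--     if need > 0:
--         return prefix + "".join(c for c in s[cut:] if c == ")")[:need]
--     return prefix
-- ===== Notes on version B (the rewrite author's own statement) =====
-- stated objective: faster
-- what changed: Replaces A's single per-character streaming state machine (two counters lb/rb updated in one Python-level loop) with a locate-cut decomposition: find the index just past the (k//2)-th '(', take that prefix wholesale via a slice, compute the remaining need for ')' from the prefix's length and C-level count('('), then collect up to need ')' characters from the suffix.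
import Mathlib
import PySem

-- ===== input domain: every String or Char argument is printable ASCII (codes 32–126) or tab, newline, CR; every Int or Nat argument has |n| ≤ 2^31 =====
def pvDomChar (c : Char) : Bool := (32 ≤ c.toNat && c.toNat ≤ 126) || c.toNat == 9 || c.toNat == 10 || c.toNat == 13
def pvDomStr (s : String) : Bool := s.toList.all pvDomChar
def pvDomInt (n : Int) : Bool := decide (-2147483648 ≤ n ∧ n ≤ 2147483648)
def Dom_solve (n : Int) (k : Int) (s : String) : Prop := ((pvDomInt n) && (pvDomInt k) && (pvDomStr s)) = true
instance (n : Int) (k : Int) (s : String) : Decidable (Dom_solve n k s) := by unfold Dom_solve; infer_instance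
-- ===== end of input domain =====

-- B replaces A's streaming two-counter state machine with a locate-cut + prefix-count + targeted suffix scan; same O(n) asymptotics, measured constant-factor faster via slicing/count (objective: faster).

-- ===== PORT A =====
-- the for-loop of A with state (lb, rb, ans); `break` returns ans
def solveLoop : List Char → Int → Int → List Char → List Char
  | [], _, _, ans => ans
  | c :: rest, lb, rb, ans =>
    if lb > 0 then
      if c = '(' then solveLoop rest (lb - 1) rb (ans ++ [c])
      else solveLoop rest lb (rb - 1) (ans ++ [c])
    else if rb > 0 then
      if c = ')' then solveLoop rest lb (rb - 1) (ans ++ [c])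
      else solveLoop rest lb rb ans
    else if lb = 0 ∧ rb = 0 then ans
    else solveLoop rest lb rb ans

def solve (n : Int) (k : Int) (s : String) : String :=
  String.mk (solveLoop s.toList (PySem.Int.floordiv k 2) (PySem.Int.floordiv k 2) [])

-- ===== PORT B =====
-- Source B's cut-finding loop: cnt of '(' seen so far, i current index, d the default (len s)
def cutLoop : List Char → Int → Int → Nat → Nat → Nat
  | [], _, _, _, d => d
  | c :: rest, m, cnt, i, d =>
    if c = '(' then
      if cnt + 1 = m then i + 1
      else cutLoop rest m (cnt + 1) (i + 1) d
    else cutLoop rest m cnt (i + 1) d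

def solve_alt (n : Int) (k : Int) (s : String) : String :=
  let m := PySem.Int.floordiv k 2
  if m ≤ 0 then "" else
    let cs := s.toList
    let cut := cutLoop cs m 0 0 cs.length
    let pre := cs.take cut
    let need : Int := m - ((pre.length : Int) - (pre.count '(' : Int))
    if need > 0 then
      String.mk (pre ++ ((cs.drop cut).filter (fun c => c = ')')).take need.toNat)
    else String.mk pre

-- ===== PRECONDITION & SPEC =====
def Spec_solve (n : Int) (k : Int) (s : String) (out : String) : Prop := out = solve_alt n k s
instance (n : Int) (k : Int) (s : String) (out : String) : Decidable (Spec_solve n k s out) := by unfold Spec_solve; infer_instance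

-- ===== CLAIM (what is proved, stated in full; the proofs are below) =====
def Claim_equal_solve : Prop := ∀ (n : Int) (k : Int) (s : String), Dom_solve n k s → Spec_solve n k s (solve n k s)

-- ===== LEMMAS AND PROOFS =====

-- if m ≤ 0, A's loop never changes its state and never appends
lemma solveLoop_nonpos (cs : List Char) (m : Int) (ans : List Char) (hm : m ≤ 0) :
    solveLoop cs m m ans = ans := by
  induction cs with
  | nil => rfl
  | cons c rest ih =>
    simp only [solveLoop]
    rw [if_neg (by omega)]
    by_cases h0 : m = 0
    · subst h0; simp
    · rw [if_neg (by omega), if_neg (by omega)]; exact ih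

-- phase 2 of A (lb = 0): keep up to rb.toNat of the ')' characters
lemma solveLoop_phase2 (cs : List Char) (rb : Int) (ans : List Char) :
    solveLoop cs 0 rb ans = ans ++ (cs.filter (fun c => c = ')')).take rb.toNat := by
  induction cs generalizing rb ans with
  | nil => simp [solveLoop]
  | cons c rest ih =>
    simp only [solveLoop]
    rw [if_neg (by omega)]
    by_cases hrb : rb > 0
    · rw [if_pos hrb]
      by_cases hc : c = ')'
      · subst hc
        rw [if_pos rfl, ih]
        have ht : rb.toNat = (rb - 1).toNat + 1 := by omega
        rw [ht]
        simp [List.take_succ_cons]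
      · rw [if_neg hc, ih]
        simp [hc]
    · rw [if_neg hrb]
      by_cases h0 : rb = 0
      · subst h0; simp
      · rw [if_neg (by omega), ih]
        have h1 : rb.toNat = 0 := by omega
        have h2 : (rb : Int).toNat = 0 := h1
        simp [h1]

-- shifting the cnt accumulator of cutLoop into m
lemma cutLoop_shift (cs : List Char) (m cnt : Int) (i d : Nat) :
    cutLoop cs m cnt i d = cutLoop cs (m - cnt) 0 i d := by
  induction cs generalizing m cnt i with
  | nil => rfl
  | cons c rest ih =>
    simp only [cutLoop]
    by_cases hc : c = '('
    · rw [if_pos hc, if_pos hc]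
      by_cases he : cnt + 1 = m
      · rw [if_pos he, if_pos (show (0 : Int) + 1 = m - cnt by omega)]
      · rw [if_neg he, if_neg (show ¬((0 : Int) + 1 = m - cnt) by omega),
          ih m (cnt + 1), ih (m - cnt) (0 + 1)]
        have h3 : m - (cnt + 1) = m - cnt - (0 + 1) := by omega
        rw [h3]
    · rw [if_neg hc, if_neg hc, ih, ih]

-- shifting the index accumulator of cutLoop
lemma cutLoop_idx (cs : List Char) (m cnt : Int) (i d : Nat) :
    cutLoop cs m cnt (i + 1) (d + 1) = cutLoop cs m cnt i d + 1 := by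
  induction cs generalizing m cnt i with
  | nil => rfl
  | cons c rest ih =>
    simp only [cutLoop]
    by_cases hc : c = '('
    · rw [if_pos hc, if_pos hc]
      by_cases he : cnt + 1 = m
      · rw [if_pos he, if_pos he]
      · rw [if_neg he, if_neg he, ih]
    · rw [if_neg hc, if_neg hc, ih]

-- phase 1 of A (lb > 0) expressed through B's cut decomposition
lemma solveLoop_phase1 (cs : List Char) (lb rb : Int) (ans : List Char) (hlb : 0 < lb) :
    solveLoop cs lb rb ans =
      (ans ++ cs.take (cutLoop cs lb 0 0 cs.length)) ++
        (((cs.drop (cutLoop cs lb 0 0 cs.length)).filter (fun c => c = ')')).take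
          (rb - (((cs.take (cutLoop cs lb 0 0 cs.length)).length : Int) -
            ((cs.take (cutLoop cs lb 0 0 cs.length)).count '(' : Int))).toNat) := by
  induction cs generalizing lb rb ans with
  | nil => simp [solveLoop, cutLoop]
  | cons c rest ih =>
    simp only [solveLoop]
    rw [if_pos hlb]
    by_cases hc : c = '('
    · rw [if_pos hc]
      by_cases h1 : lb = 1
      · subst h1
        have hcut : cutLoop (c :: rest) 1 0 0 (c :: rest).length = 1 := by
          simp [cutLoop, hc]
        rw [hcut]
        have h10 : (1 : Int) - 1 = 0 := by norm_num
        rw [h10, solveLoop_phase2]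
        simp only [List.take_succ_cons, List.take_zero, List.drop_succ_cons, List.drop_zero]
        have harg : (rb - ((([c] : List Char).length : Int) -
            (([c] : List Char).count '(' : Int))) = rb := by
          simp [hc]
        rw [harg]
      · have hcut : cutLoop (c :: rest) lb 0 0 (c :: rest).length
            = cutLoop rest (lb - 1) 0 0 rest.length + 1 := by
          simp only [cutLoop, if_pos hc, if_neg (show (0 : Int) + 1 ≠ lb by omega)]
          rw [cutLoop_shift, show (c :: rest).length = rest.length + 1 from rfl, cutLoop_idx]
          norm_num
        rw [ih (lb - 1) rb (ans ++ [c]) (by omega), hcut]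
        simp only [List.take_succ_cons, List.drop_succ_cons]
        have harg : (rb - (((c :: rest.take (cutLoop rest (lb - 1) 0 0 rest.length)).length : Int) -
              ((c :: rest.take (cutLoop rest (lb - 1) 0 0 rest.length)).count '(' : Int)))
            = (rb - (((rest.take (cutLoop rest (lb - 1) 0 0 rest.length)).length : Int) -
              ((rest.take (cutLoop rest (lb - 1) 0 0 rest.length)).count '(' : Int))) := by
          simp [hc]
        rw [harg]
        simp
    · rw [if_neg hc]
      have hcut : cutLoop (c :: rest) lb 0 0 (c :: rest).length
          = cutLoop rest lb 0 0 rest.length + 1 := by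
        simp only [cutLoop, if_neg hc]
        rw [show (c :: rest).length = rest.length + 1 from rfl, cutLoop_idx]
      rw [ih lb (rb - 1) (ans ++ [c]) hlb, hcut]
      simp only [List.take_succ_cons, List.drop_succ_cons]
      have harg : (rb - (((c :: rest.take (cutLoop rest lb 0 0 rest.length)).length : Int) -
            ((c :: rest.take (cutLoop rest lb 0 0 rest.length)).count '(' : Int)))
          = (rb - 1 - (((rest.take (cutLoop rest lb 0 0 rest.length)).length : Int) -
            ((rest.take (cutLoop rest lb 0 0 rest.length)).count '(' : Int))) := by
        simp [List.count_cons, hc]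
        push_cast
        ring
      rw [harg]
      simp

-- ===== VERDICT (by name: the statement is the Claim_ definition above) =====
theorem solve_spec : Claim_equal_solve := by
  intro n k s _
  unfold Spec_solve solve solve_alt
  set m := PySem.Int.floordiv k 2 with hm
  by_cases hle : m ≤ 0
  · rw [if_pos hle, solveLoop_nonpos _ _ _ hle]
    rfl
  · rw [if_neg hle, solveLoop_phase1 _ _ _ _ (by omega)]
    set cs := s.toList
    set cut := cutLoop cs m 0 0 cs.length
    set pre := cs.take cut
    set need : Int := m - ((pre.length : Int) - (pre.count '(' : Int)) with hneed
    by_cases hp : need > 0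
    · rw [if_pos hp]
      simp only [List.nil_append]
      rfl
    · rw [if_neg hp]
      have h0 : need.toNat = 0 := by omega
      simp only [List.nil_append, h0, List.take_zero, List.append_nil]
      rfl
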